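-- pv_equiv track=rewrite | github.com/thunguyen19/advent-of-code-2020 | day1/day1.py | part_1
-- ===== SOURCE A (Python) =====
-- def part_1(entries, target):
--     dictionary = {}
--     for e in entries:
--         entry = int(e)
--         r = target - entry
--         dictionary[r] = entry
--
--     result = 0
--     for e in entries:
--         entry = int(e)
--         if entry in dictionary:
--             result = max(result, entry * dictionary[entry])
--     return result
-- ===== SOURCE B (Python) =====
-- def part_1(entries, target):
--     nums = [int(e) for e in entries]
--     result = 0
--     for a in nums:
--         for b in nums:
--             if a + b == target:
--                 result = max(result, a * b)
--     return result
-- ===== Notes on version B (the rewrite author's own statement) =====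
-- stated objective: simpler
-- what changed: Replaced the complement-dictionary index (build dict target-e -> e, then membership-guarded lookups) by the plain brute-force double loop over all ordered pairs summing to target, keeping a running max; no dictionary at all.
import Mathlib
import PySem

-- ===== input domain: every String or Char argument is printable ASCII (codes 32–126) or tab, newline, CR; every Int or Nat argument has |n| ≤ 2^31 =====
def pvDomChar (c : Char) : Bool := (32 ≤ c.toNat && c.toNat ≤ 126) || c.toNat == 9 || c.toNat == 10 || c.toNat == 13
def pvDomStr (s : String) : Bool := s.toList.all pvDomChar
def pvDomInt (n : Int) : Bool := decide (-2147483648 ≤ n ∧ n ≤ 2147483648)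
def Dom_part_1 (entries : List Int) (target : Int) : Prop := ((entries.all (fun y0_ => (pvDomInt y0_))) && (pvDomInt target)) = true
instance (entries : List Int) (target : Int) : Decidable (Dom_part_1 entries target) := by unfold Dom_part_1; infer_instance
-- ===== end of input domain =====

-- B replaces A's complement-dictionary with a plain brute-force double loop over all pairs (simpler, no dict; O(n^2) instead of O(n)).

-- ===== PORT A =====
def part_1 (entries : List Int) (target : Int) : Int :=
  let dictionary := entries.foldl (fun d e => d.insert (target - e) e) (PySem.Dict.empty : PySem.Dict Int Int)
  entries.foldl (fun result e =>
    match dictionary.get? e with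
    | some v => max result (e * v)
    | none => result) 0

-- ===== PORT B =====
def part_1_alt (entries : List Int) (target : Int) : Int :=
  entries.foldl (fun result a =>
    entries.foldl (fun result b =>
      if a + b = target then max result (a * b) else result) result) 0

-- ===== PRECONDITION & SPEC =====
def Spec_part_1 (entries : List Int) (target : Int) (out : Int) : Prop := out = part_1_alt entries target
instance (entries : List Int) (target : Int) (out : Int) : Decidable (Spec_part_1 entries target out) := by unfold Spec_part_1; infer_instance

-- ===== CLAIM (what is proved, stated in full; the proofs are below) =====
def Claim_equal_part_1 : Prop := ∀ (entries : List Int) (target : Int), Dom_part_1 entries target → Spec_part_1 entries target (part_1 entries target)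

-- ===== LEMMAS AND PROOFS =====

-- The dict built by A maps k to target - k exactly when target - k occurs in the scanned list.
theorem dict_get (target : Int) (l : List Int) (d0 : PySem.Dict Int Int) (k : Int) :
    (l.foldl (fun d e => d.insert (target - e) e) d0).get? k
      = if (target - k) ∈ l then some (target - k) else d0.get? k := by
  induction l generalizing d0 with
  | nil => simp
  | cons e es ih =>
    simp only [List.foldl_cons, ih, List.mem_cons]
    by_cases h : e = target - k
    · subst h
      have h2 : target - (target - k) = k := by omega
      rw [h2]
      by_cases hm : (target - k) ∈ es
      · simp [hm]
      · simp [hm]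
    · have hk : k ≠ target - e := by omega
      have hne : target - k ≠ e := by omega
      by_cases hm : (target - k) ∈ es <;>
        simp [hm, PySem.Dict.get?_insert, hk, hne]

-- B's inner loop over b collapses: b must equal target - a, and max is idempotent.
theorem inner_loop (a target : Int) (l : List Int) (r : Int) :
    l.foldl (fun r b => if a + b = target then max r (a * b) else r) r
      = if (target - a) ∈ l then max r (a * (target - a)) else r := by
  induction l generalizing r with
  | nil => simp
  | cons b bs ih =>
    simp only [List.foldl_cons, List.mem_cons]
    by_cases h : a + b = target
    · have hb : b = target - a := by omega
      subst hb
      by_cases hm : (target - a) ∈ bs <;>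
        simp [h, hm, ih]
    · have hb : target - a ≠ b := by omega
      by_cases hm : (target - a) ∈ bs <;> simp [h, hm, ih, hb]

theorem part_1_eq (entries : List Int) (target : Int) :
    part_1 entries target = part_1_alt entries target := by
  unfold part_1 part_1_alt
  apply PySem.List.foldl_congr_mem
  intro r e _
  rw [dict_get, inner_loop]
  by_cases hm : (target - e) ∈ entries <;> simp [hm]

-- ===== VERDICT (by name: the statement is the Claim_ definition above) =====
theorem part_1_spec : Claim_equal_part_1 := by
  intro entries target _
  unfold Spec_part_1
  exact part_1_eq entries target
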